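-- pv_equiv track=rewrite | github.com/sahilrohane-new/Docker_Scintiai | backend/agents/utils/sas_chunker_new.py | chunk_large_blocks
-- ===== SOURCE A (Python) =====
-- def chunk_large_blocks(chunks: list[str], max_chunk_size: int) -> list[str]:
--     sub_chunks = []
--     for chunk in chunks:
--         lines = chunk.split("\n")
--         temp_chunk = []
--         for line in lines:
--             temp_chunk.append(line)
--             if len(temp_chunk) >= max_chunk_size and line.strip().upper().endswith(("RUN;", "QUIT;", "%MEND;")):
--                 sub_chunks.append("\n".join(temp_chunk))
--                 temp_chunk = []
--         if temp_chunk: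
--             sub_chunks.append("\n".join(temp_chunk))
--     return sub_chunks
-- ===== SOURCE B (Python) =====
-- def chunk_large_blocks(chunks: list[str], max_chunk_size: int) -> list[str]:
--     sub_chunks = []
--     for chunk in chunks:
--         lines = chunk.split("\n")
--         # pass 1: find the split boundaries
--         bounds = [0]
--         count = 0
--         for i, line in enumerate(lines):
--             count += 1
--             if count >= max_chunk_size and line.strip().upper().endswith(("RUN;", "QUIT;", "%MEND;")):
--                 bounds.append(i + 1)
--                 count = 0
--         # pass 2: slice between consecutive boundaries
--         for a, b in zip(bounds, bounds[1:]):
--             sub_chunks.append("\n".join(lines[a:b]))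
--         if bounds[-1] < len(lines):
--             sub_chunks.append("\n".join(lines[bounds[-1]:]))
--     return sub_chunks
-- ===== Notes on version B (the rewrite author's own statement) =====
-- stated objective: alternative
-- what changed: Replaces A's inline accumulate-append-flush loop with a two-pass find-boundaries-then-slice decomposition: first compute the list of split indices with a reset counter, then emit each sub-chunk by slicing lines between consecutive boundaries.
import Mathlib
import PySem

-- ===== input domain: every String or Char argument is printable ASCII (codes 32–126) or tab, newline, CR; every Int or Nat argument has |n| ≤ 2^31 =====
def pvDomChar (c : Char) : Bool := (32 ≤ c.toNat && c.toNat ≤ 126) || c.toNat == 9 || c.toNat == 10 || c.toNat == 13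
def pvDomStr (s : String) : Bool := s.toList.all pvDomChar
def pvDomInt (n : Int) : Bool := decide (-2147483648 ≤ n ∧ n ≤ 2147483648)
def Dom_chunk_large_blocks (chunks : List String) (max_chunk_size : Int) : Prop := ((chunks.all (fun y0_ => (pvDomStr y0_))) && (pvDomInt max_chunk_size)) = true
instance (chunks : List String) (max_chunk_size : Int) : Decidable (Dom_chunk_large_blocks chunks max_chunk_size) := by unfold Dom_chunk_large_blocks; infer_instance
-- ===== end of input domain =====

-- B replaces A's inline accumulate-and-flush loop by a find-boundaries-then-slice
-- decomposition (same cost, different structure; objective: alternative).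

-- ===== PORT A =====
-- line.strip().upper().endswith(("RUN;", "QUIT;", "%MEND;"))
def pvTerm (line : String) : Bool :=
  PySem.Str.endswith (PySem.Str.upper (PySem.Str.strip line)) "RUN;" ||
  PySem.Str.endswith (PySem.Str.upper (PySem.Str.strip line)) "QUIT;" ||
  PySem.Str.endswith (PySem.Str.upper (PySem.Str.strip line)) "%MEND;"

def chunk_large_blocks (chunks : List String) (max_chunk_size : Int) : List String :=
  chunks.foldl (fun sub_chunks chunk =>
    let lines := (PySem.Str.split? chunk "\n").getD []
    let st := lines.foldl (fun (st : List String × List String) line =>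
      let temp := st.2 ++ [line]
      if decide (max_chunk_size ≤ (temp.length : Int)) && pvTerm line then
        (st.1 ++ [PySem.Str.join "\n" temp], [])
      else (st.1, temp)) (sub_chunks, [])
    if st.2.isEmpty then st.1 else st.1 ++ [PySem.Str.join "\n" st.2]) []

-- ===== PORT B =====
-- bounds[-1] is ported as getLast! : bounds starts as [0] and only grows, so it is never empty.
def chunk_large_blocks_alt (chunks : List String) (max_chunk_size : Int) : List String :=
  chunks.foldl (fun sub_chunks chunk =>
    let lines := (PySem.Str.split? chunk "\n").getD []
    let bc := (PySem.List.enumerate lines 0).foldl (fun (bc : List Int × Int) p =>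
      let c := bc.2 + 1
      if decide (max_chunk_size ≤ c) && pvTerm p.2 then (bc.1 ++ [p.1 + 1], 0)
      else (bc.1, c)) (([0], 0) : List Int × Int)
    let bounds := bc.1
    let out := sub_chunks ++ (bounds.zip (PySem.List.slice bounds (some 1) none)).map
      (fun ab => PySem.Str.join "\n" (PySem.List.slice lines (some ab.1) (some ab.2)))
    if bounds.getLast! < (lines.length : Int) then
      out ++ [PySem.Str.join "\n" (PySem.List.slice lines (some bounds.getLast!) none)]
    else out) []

-- ===== PRECONDITION & SPEC =====
def Spec_chunk_large_blocks (chunks : List String) (max_chunk_size : Int) (out : List String) : Prop := out = chunk_large_blocks_alt chunks max_chunk_size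
instance (chunks : List String) (max_chunk_size : Int) (out : List String) : Decidable (Spec_chunk_large_blocks chunks max_chunk_size out) := by unfold Spec_chunk_large_blocks; infer_instance

-- ===== CLAIM (what is proved, stated in full; the proofs are below) =====
def Claim_equal_chunk_large_blocks : Prop := ∀ (chunks : List String) (max_chunk_size : Int), Dom_chunk_large_blocks chunks max_chunk_size → Spec_chunk_large_blocks chunks max_chunk_size (chunk_large_blocks chunks max_chunk_size)

-- ===== LEMMAS AND PROOFS =====

-- reference per-chunk recursion: segments of `lines` given pending `temp`
def segs (m : Int) : List String → List String → List String
  | [], temp => if temp.isEmpty then [] else [PySem.Str.join "\n" temp]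
  | l :: rest, temp =>
      let t := temp ++ [l]
      if decide (m ≤ (t.length : Int)) && pvTerm l then
        PySem.Str.join "\n" t :: segs m rest []
      else segs m rest t

-- boundaries B records while scanning the enumerated suffix with counter c
def nb (m : Int) : List (Int × String) → Int → List Int
  | [], _ => []
  | p :: rest, c =>
      if decide (m ≤ c + 1) && pvTerm p.2 then (p.1 + 1) :: nb m rest 0
      else nb m rest (c + 1)

-- B's per-chunk emission from a bounds list
def renderZ (lines : List String) (bounds : List Int) : List String :=
  (bounds.zip (PySem.List.slice bounds (some 1) none)).map
    (fun ab => PySem.Str.join "\n" (PySem.List.slice lines (some ab.1) (some ab.2))) ++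
  (if bounds.getLast! < (lines.length : Int) then
    [PySem.Str.join "\n" (PySem.List.slice lines (some bounds.getLast!) none)]
   else [])

lemma aFold (m : Int) : ∀ (lines s temp : List String),
    (let st := lines.foldl (fun (st : List String × List String) line =>
      let t := st.2 ++ [line]
      if decide (m ≤ (t.length : Int)) && pvTerm line then
        (st.1 ++ [PySem.Str.join "\n" t], [])
      else (st.1, t)) (s, temp)
     if st.2.isEmpty then st.1 else st.1 ++ [PySem.Str.join "\n" st.2])
    = s ++ segs m lines temp := by
  intro lines
  induction lines with
  | nil =>
    intro s temp
    simp only [List.foldl_nil, segs]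
    split <;> simp
  | cons l rest ih =>
    intro s temp
    simp only [List.foldl_cons, segs]
    by_cases h : (decide (m ≤ ((temp ++ [l]).length : Int)) && pvTerm l) = true
    · simp only [h, if_pos]
      rw [ih (s ++ [PySem.Str.join "\n" (temp ++ [l])]) []]
      simp
    · simp only [Bool.not_eq_true] at h
      simp only [h, Bool.false_eq_true, if_false]
      rw [ih s (temp ++ [l])]

lemma bFold (m : Int) : ∀ (ps : List (Int × String)) (bs : List Int) (c : Int),
    (ps.foldl (fun (bc : List Int × Int) p =>
      let c := bc.2 + 1
      if decide (m ≤ c) && pvTerm p.2 then (bc.1 ++ [p.1 + 1], 0)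
      else (bc.1, c)) (bs, c)).1 = bs ++ nb m ps c := by
  intro ps
  induction ps with
  | nil => intro bs c; simp [nb]
  | cons p rest ih =>
    intro bs c
    simp only [List.foldl_cons, nb]
    by_cases h : (decide (m ≤ c + 1) && pvTerm p.2) = true
    · simp only [h, if_pos]
      rw [ih (bs ++ [p.1 + 1]) 0]
      simp
    · simp only [Bool.not_eq_true] at h
      simp only [h, Bool.false_eq_true, if_false]
      rw [ih bs (c + 1)]

lemma nb_shift (m : Int) : ∀ (xs : List String) (s d c : Int),
    nb m (PySem.List.enumerate xs (s + d)) c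
      = (nb m (PySem.List.enumerate xs s) c).map (· + d) := by
  intro xs
  induction xs with
  | nil => intro s d c; simp [PySem.List.enumerate_nil, nb]
  | cons x rest ih =>
    intro s d c
    rw [PySem.List.enumerate_cons, PySem.List.enumerate_cons]
    simp only [nb]
    by_cases h : (decide (m ≤ c + 1) && pvTerm x) = true
    · simp only [h, if_pos, List.map_cons]
      have e : s + d + 1 = s + 1 + d := by ring
      rw [e, ih (s + 1) d 0]
    · simp only [Bool.not_eq_true] at h
      simp only [h, Bool.false_eq_true, if_false]
      have : s + d + 1 = s + 1 + d := by ring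
      rw [this, ih (s + 1) d (c + 1)]

lemma nb_nonneg (m : Int) : ∀ (xs : List String) (s c : Int), 0 ≤ s →
    ∀ b ∈ nb m (PySem.List.enumerate xs s) c, 0 ≤ b := by
  intro xs
  induction xs with
  | nil => intro s c _; simp [PySem.List.enumerate_nil, nb]
  | cons x rest ih =>
    intro s c hs
    rw [PySem.List.enumerate_cons]
    simp only [nb]
    by_cases h : (decide (m ≤ c + 1) && pvTerm x) = true
    · simp only [h, if_pos, List.mem_cons]
      rintro b (rfl | hb)
      · omega
      · exact ih (s + 1) 0 (by omega) b hb
    · simp only [Bool.not_eq_true] at h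
      simp only [h, Bool.false_eq_true, if_false]
      exact ih (s + 1) (c + 1) (by omega)

lemma renderZ_cons (lines : List String) (a b : Int) (bs : List Int) :
    renderZ lines (a :: b :: bs)
      = PySem.Str.join "\n" (PySem.List.slice lines (some a) (some b)) :: renderZ lines (b :: bs) := by
  simp [renderZ, PySem.List.slice_from_one]

lemma render_shift (pre tail : List String) : ∀ (bs : List Int) (a : Int), 0 ≤ a →
    (∀ b ∈ bs, 0 ≤ b) →
    renderZ (pre ++ tail) ((a + (pre.length : Int)) :: bs.map (· + (pre.length : Int)))
      = renderZ tail (a :: bs) := by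
  intro bs
  induction bs with
  | nil =>
    intro a ha _
    simp only [List.map_nil, renderZ, PySem.List.slice_from_one, List.tail_cons,
      List.zip_nil_right, List.map_nil, List.nil_append]
    have hg1 : ([a + (pre.length : Int)]).getLast! = a + (pre.length : Int) := rfl
    have hg2 : ([a] : List Int).getLast! = a := rfl
    rw [hg1, hg2]
    have hd : ((a + (pre.length : Int)) < ((pre ++ tail).length : Int)) ↔ (a < (tail.length : Int)) := by
      simp [List.length_append]; omega
    have hs : PySem.List.slice (pre ++ tail) (some (a + (pre.length : Int))) none
        = PySem.List.slice tail (some a) none := by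
      rw [PySem.List.slice_from _ (by omega), PySem.List.slice_from _ ha]
      have : (a + (pre.length : Int)).toNat = pre.length + a.toNat := by omega
      rw [this, List.drop_append]
      simp
    rw [hs]
    split <;> split <;> first | rfl | (exfalso; omega)
  | cons b bs ih =>
    intro a ha hnn
    simp only [List.map_cons]
    rw [renderZ_cons, renderZ_cons]
    have hb : (0:Int) ≤ b := hnn b (by simp)
    have hs : PySem.List.slice (pre ++ tail) (some (a + (pre.length : Int))) (some (b + (pre.length : Int)))
        = PySem.List.slice tail (some a) (some b) := by
      rw [PySem.List.slice_toNat _ (by omega) (by omega), PySem.List.slice_toNat _ ha hb]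
      have h1 : (a + (pre.length : Int)).toNat = pre.length + a.toNat := by omega
      have h2 : (b + (pre.length : Int)).toNat - (pre.length + a.toNat) = b.toNat - a.toNat := by omega
      rw [h1, h2, List.drop_append]
      rw [List.drop_eq_nil_of_le (by omega)]
      simp
    rw [hs, ih b hb (fun x hx => hnn x (by simp [hx]))]

lemma mainG (m : Int) : ∀ (rest temp : List String),
    renderZ (temp ++ rest) (0 :: nb m (PySem.List.enumerate rest (temp.length : Int)) (temp.length : Int))
      = segs m rest temp := by
  intro rest
  induction rest with
  | nil =>
    intro temp
    simp only [PySem.List.enumerate_nil, nb, List.append_nil, segs]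
    simp only [renderZ, PySem.List.slice_from_one, List.tail_cons, List.zip_nil_right,
      List.map_nil, List.nil_append]
    have hg : (([0] : List Int)).getLast! = 0 := rfl
    rw [hg, PySem.List.slice_from _ (by omega)]
    simp only [Int.toNat_zero, List.drop_zero]
    by_cases he : temp = []
    · subst he; simp
    · have h1 : (0:Int) < (temp.length : Int) := by
        have := List.length_pos_iff.mpr he; omega
      rw [if_pos h1, if_neg (by simpa [List.isEmpty_iff] using he)]
  | cons l r ih =>
    intro temp
    rw [PySem.List.enumerate_cons]
    simp only [nb, segs]
    have hlen : (((temp ++ [l]).length : Nat) : Int) = (temp.length : Int) + 1 := by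
      simp
    rw [hlen]
    have hfull : temp ++ l :: r = (temp ++ [l]) ++ r := by simp
    by_cases h : (decide (m ≤ (temp.length : Int) + 1) && pvTerm l) = true
    · simp only [h, if_pos]
      rw [renderZ_cons]
      have hslice : PySem.List.slice (temp ++ l :: r) (some 0) (some ((temp.length : Int) + 1))
          = temp ++ [l] := by
        rw [PySem.List.slice_toNat _ (by omega) (by omega)]
        simp only [Int.toNat_zero, List.drop_zero, Nat.sub_zero]
        rw [hfull]
        have : ((temp.length : Int) + 1).toNat = (temp ++ [l]).length := by simp
        rw [this, List.take_left]
      rw [hslice]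
      have hshift : nb m (PySem.List.enumerate r ((temp.length : Int) + 1)) 0
          = (nb m (PySem.List.enumerate r 0) 0).map (· + ((temp.length : Int) + 1)) := by
        have := nb_shift m r 0 ((temp.length : Int) + 1) 0
        simpa using this
      rw [hshift, hfull]
      have hlen2 : ((temp.length : Int) + 1) = (((temp ++ [l]).length : Nat) : Int) := by
        simp
      rw [show ((temp.length : Int) + 1) :: (nb m (PySem.List.enumerate r 0) 0).map (· + ((temp.length : Int) + 1))
            = ((0 : Int) + (((temp ++ [l]).length : Nat) : Int)) :: (nb m (PySem.List.enumerate r 0) 0).map (· + (((temp ++ [l]).length : Nat) : Int)) from by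
        rw [← hlen2]; simp]
      rw [render_shift (temp ++ [l]) r (nb m (PySem.List.enumerate r 0) 0) 0 le_rfl
        (nb_nonneg m r 0 0 le_rfl)]
      have := ih []
      simp only [List.nil_append, List.length_nil, Nat.cast_zero] at this
      rw [this]
    · simp only [Bool.not_eq_true] at h
      simp only [h, Bool.false_eq_true, if_false]
      have := ih (temp ++ [l])
      rw [hfull]
      simpa [hlen] using this

lemma per_chunk (m : Int) (acc : List String) (chunk : String) :
    (let lines := (PySem.Str.split? chunk "\n").getD []
     let st := lines.foldl (fun (st : List String × List String) line =>
       let temp := st.2 ++ [line]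
       if decide (m ≤ (temp.length : Int)) && pvTerm line then
         (st.1 ++ [PySem.Str.join "\n" temp], [])
       else (st.1, temp)) (acc, [])
     if st.2.isEmpty then st.1 else st.1 ++ [PySem.Str.join "\n" st.2])
    = (let lines := (PySem.Str.split? chunk "\n").getD []
       let bc := (PySem.List.enumerate lines 0).foldl (fun (bc : List Int × Int) p =>
         let c := bc.2 + 1
         if decide (m ≤ c) && pvTerm p.2 then (bc.1 ++ [p.1 + 1], 0)
         else (bc.1, c)) (([0], 0) : List Int × Int)
       let bounds := bc.1
       let out := acc ++ (bounds.zip (PySem.List.slice bounds (some 1) none)).map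
         (fun ab => PySem.Str.join "\n" (PySem.List.slice lines (some ab.1) (some ab.2)))
       if bounds.getLast! < (lines.length : Int) then
         out ++ [PySem.Str.join "\n" (PySem.List.slice lines (some bounds.getLast!) none)]
       else out) := by
  set lines := (PySem.Str.split? chunk "\n").getD [] with hlines
  rw [aFold m lines acc []]
  have hbf := bFold m (PySem.List.enumerate lines 0) [0] 0
  dsimp only at hbf ⊢
  rw [hbf]
  have hb : ([0] : List Int) ++ nb m (PySem.List.enumerate lines 0) 0
      = 0 :: nb m (PySem.List.enumerate lines 0) 0 := by simp
  rw [hb]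
  have hmain := mainG m lines []
  simp only [List.nil_append, List.length_nil, Nat.cast_zero] at hmain
  rw [← hmain]
  simp only [renderZ]
  split <;> simp

-- ===== VERDICT (by name: the statement is the Claim_ definition above) =====
theorem chunk_large_blocks_spec : Claim_equal_chunk_large_blocks := by
  intro chunks m _
  unfold Spec_chunk_large_blocks chunk_large_blocks chunk_large_blocks_alt
  apply PySem.List.foldl_congr_mem
  intro acc chunk _
  exact per_chunk m acc chunk
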